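-- pv_equiv track=rewrite | github.com/JaniceYangYintine/AI-SkinPerfection-Project | ETL/stage5_apply_mapping.py | map_from_text
-- ===== SOURCE A (Python) =====
-- def add_unique(target: list[str], seen: set[str], tag: str) -> None:
--     if tag and tag not in seen:
--         seen.add(tag)
--         target.append(tag)
--
-- def map_from_text(text: str, mapping: dict[str, str], allowed: set[str] | None = None) -> list[str]:
--     if not text:
--         return []
--     result: list[str] = []
--     seen: set[str] = set()
--     for token, unified in mapping.items():
--         if allowed is not None and token not in allowed:
--             continue
--         if token and token in text:
--             add_unique(result, seen, unified)
--     return result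
-- ===== SOURCE B (Python) =====
-- def map_from_text(text: str, mapping: dict[str, str], allowed: set[str] | None = None) -> list[str]:
--     if not text:
--         return []
--     # index every substring of text whose length matches some eligible token
--     lengths = {len(t) for t in mapping if t and (allowed is None or t in allowed)}
--     subs = set()
--     for L in lengths:
--         for i in range(len(text) - L + 1):
--             subs.add(text[i:i + L])
--     tags = [u for t, u in mapping.items()
--             if (allowed is None or t in allowed) and t and t in subs and u]
--     return list(dict.fromkeys(tags))
-- ===== Notes on version B (the rewrite author's own statement) =====
-- stated objective: faster
-- what changed: Instead of scanning the text once per mapping token, B builds a hash set of all text substrings whose length matches some eligible token, then decides each token's presence by one set lookup in a single filtered pass, deduplicating tags with dict.fromkeys.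
import Mathlib
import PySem

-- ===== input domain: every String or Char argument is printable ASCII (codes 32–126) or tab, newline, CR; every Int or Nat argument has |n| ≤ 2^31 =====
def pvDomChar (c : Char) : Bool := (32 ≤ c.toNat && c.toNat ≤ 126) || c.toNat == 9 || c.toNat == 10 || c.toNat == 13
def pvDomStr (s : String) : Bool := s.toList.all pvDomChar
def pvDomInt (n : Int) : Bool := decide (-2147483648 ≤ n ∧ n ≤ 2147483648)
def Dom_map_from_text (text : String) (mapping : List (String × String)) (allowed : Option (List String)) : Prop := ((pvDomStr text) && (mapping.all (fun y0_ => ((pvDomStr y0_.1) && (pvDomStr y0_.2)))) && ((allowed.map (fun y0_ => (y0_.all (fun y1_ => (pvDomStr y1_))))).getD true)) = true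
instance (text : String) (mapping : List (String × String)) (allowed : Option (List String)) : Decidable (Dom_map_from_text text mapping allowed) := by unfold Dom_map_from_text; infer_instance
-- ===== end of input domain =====

-- B replaces A's per-token substring scan of the text by a set of all text substrings of the
-- eligible token lengths, then one filtered pass over the mapping (measured faster on large inputs).
-- A mutates only its local lists; neither function mutates its arguments.

-- ===== PORT A =====
-- '(allowed is None or token in allowed)' — appears in both sources, so a shared helper
def pvAllowedOk (allowed : Option (List String)) (t : String) : Bool :=
  match allowed with
  | none => true
  | some al => PySem.Set.contains al t

-- port of add_unique: mutation becomes returning the new (target, seen) pair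
def addUnique (target : List String) (seen : PySem.Set String) (tag : String) :
    List String × PySem.Set String :=
  if tag ≠ "" ∧ PySem.Set.contains seen tag = false then (target ++ [tag], PySem.Set.add seen tag)
  else (target, seen)

-- the body of A's loop over mapping.items()
def pvStepA (text : String) (allowed : Option (List String))
    (st : List String × PySem.Set String) (p : String × String) :
    List String × PySem.Set String :=
  if pvAllowedOk allowed p.1 = false then st
  else if p.1 ≠ "" ∧ PySem.Str.isIn p.1 text = true then addUnique st.1 st.2 p.2
  else st

def map_from_text (text : String) (mapping : List (String × String)) (allowed : Option (List String)) : List String :=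
  if text = "" then []
  else (mapping.foldl (pvStepA text allowed) ([], PySem.Set.empty)).1

-- ===== PORT B =====
-- Source B's 'lengths' set: len(t) for eligible tokens t
def pvLengths (mapping : List (String × String)) (allowed : Option (List String)) : PySem.Set Int :=
  PySem.Set.ofList ((mapping.filter (fun p => !(p.1 == "") && pvAllowedOk allowed p.1)).map
    (fun p => PySem.Str.len p.1))

-- Source B's 'subs' set: every text[i:i+L] for each L in lengths
def pvSubs (text : String) (lengths : List Int) : PySem.Set String :=
  lengths.foldl (fun s L =>
    (PySem.List.pyRange 0 (PySem.Str.len text - L + 1) 1).foldl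
      (fun s i => PySem.Set.add s (PySem.Str.slice text (some i) (some (i + L)))) s)
    PySem.Set.empty

def map_from_text_alt (text : String) (mapping : List (String × String)) (allowed : Option (List String)) : List String :=
  if text = "" then []
  else
    PySem.List.dedup ((mapping.filter (fun p =>
        pvAllowedOk allowed p.1 && !(p.1 == "") &&
        PySem.Set.contains (pvSubs text (pvLengths mapping allowed)) p.1 && !(p.2 == ""))).map
      (fun p => p.2))

-- ===== PRECONDITION & SPEC =====
def Spec_map_from_text (text : String) (mapping : List (String × String)) (allowed : Option (List String)) (out : List String) : Prop := out = map_from_text_alt text mapping allowed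
instance (text : String) (mapping : List (String × String)) (allowed : Option (List String)) (out : List String) : Decidable (Spec_map_from_text text mapping allowed out) := by unfold Spec_map_from_text; infer_instance

-- ===== CLAIM (what is proved, stated in full; the proofs are below) =====
def Claim_equal_map_from_text : Prop := ∀ (text : String) (mapping : List (String × String)) (allowed : Option (List String)), Dom_map_from_text text mapping allowed → Spec_map_from_text text mapping allowed (map_from_text text mapping allowed)

-- ===== LEMMAS AND PROOFS =====

-- membership in a fold of Set.add over mapped elements
theorem pv_mem_foldl_add {β : Type} (l : List β) (f : β → String) (s : PySem.Set String) (y : String) :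
    y ∈ l.foldl (fun s b => PySem.Set.add s (f b)) s ↔ y ∈ s ∨ ∃ b ∈ l, y = f b := by
  induction l generalizing s with
  | nil => simp
  | cons a l ih => simp [ih, PySem.Set.mem_add]; tauto

-- membership in pvSubs
theorem pv_mem_pvSubs (text : String) (lengths : List Int) (y : String) :
    y ∈ pvSubs text lengths ↔
      ∃ L ∈ lengths, ∃ i ∈ PySem.List.pyRange 0 (PySem.Str.len text - L + 1) 1,
        y = PySem.Str.slice text (some i) (some (i + L)) := by
  unfold pvSubs
  have main : ∀ (ls : List Int) (s : PySem.Set String),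
      y ∈ ls.foldl (fun s L =>
        (PySem.List.pyRange 0 (PySem.Str.len text - L + 1) 1).foldl
          (fun s i => PySem.Set.add s (PySem.Str.slice text (some i) (some (i + L)))) s) s ↔
      y ∈ s ∨ ∃ L ∈ ls, ∃ i ∈ PySem.List.pyRange 0 (PySem.Str.len text - L + 1) 1,
        y = PySem.Str.slice text (some i) (some (i + L)) := by
    intro ls
    induction ls with
    | nil => simp
    | cons L ls ih =>
      intro s
      simp only [List.foldl_cons, ih, pv_mem_foldl_add, List.mem_cons]
      constructor
      · rintro ((h | h) | h)
        · exact Or.inl h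
        · exact Or.inr ⟨L, Or.inl rfl, h⟩
        · obtain ⟨L', hL', hi⟩ := h; exact Or.inr ⟨L', Or.inr hL', hi⟩
      · rintro (h | ⟨L', (rfl | hL'), hi⟩)
        · exact Or.inl (Or.inl h)
        · exact Or.inl (Or.inr hi)
        · exact Or.inr ⟨L', hL', hi⟩
  simpa using main lengths PySem.Set.empty

-- any slice of the text (nonnegative bounds) is a substring of the text
theorem pv_isIn_slice (text : String) (i L : Int) (hi : 0 ≤ i) (hL : 0 ≤ L) :
    PySem.Str.isIn (PySem.Str.slice text (some i) (some (i + L))) text = true := by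
  rw [PySem.Str.isIn_iff_infix]
  have hsl : (PySem.Str.slice text (some i) (some (i + L))).toList
      = List.take ((i + L).toNat - i.toNat) (List.drop i.toNat text.toList) := by
    simp [PySem.Str.slice]
    exact PySem.List.slice_toNat text.toList hi (by omega)
  rw [hsl]
  exact ((List.take_prefix _ _).isInfix).trans ((List.drop_suffix _ _).isInfix)

-- a nonempty token contained in the text is one of the indexed slices
theorem pv_token_mem_subs (text t : String) (lengths : List Int)
    (ht : t ≠ "") (hin : PySem.Str.isIn t text = true)
    (hL : ((t.toList.length : Int)) ∈ lengths) :
    t ∈ pvSubs text lengths := by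
  rw [pv_mem_pvSubs]
  refine ⟨(t.toList.length : Int), hL, ?_⟩
  rw [PySem.Str.isIn_eq] at hin
  obtain ⟨j, hpre⟩ := (PySem.Chars.exists_prefix_drop_iff_isIn t.toList text.toList).2 hin
  have hlen : t.toList.length ≤ text.toList.length - j := by
    simpa using hpre.length_le
  have htne : t.toList ≠ [] := by
    intro h; apply ht; rw [← String.toList_inj]; simpa using h
  have hjb : j + t.toList.length ≤ text.toList.length := by
    by_cases h : j ≤ text.toList.length
    · omega
    · exfalso
      have hd : (List.drop j text.toList) = [] := List.drop_eq_nil_of_le (by omega)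
      rw [hd] at hpre
      exact htne (List.prefix_nil.mp hpre)
  refine ⟨(j : Int), ?_, ?_⟩
  · rw [PySem.List.mem_pyRange_one]
    constructor
    · positivity
    · rw [PySem.Str.len_eq]; omega
  · rw [← String.toList_inj]
    have hc : PySem.Chars.slice text.toList (some (j : Int)) (some ((j : Int) + (t.toList.length : Int)))
        = List.take t.toList.length (List.drop j text.toList) :=
      PySem.List.slice_natCast_add text.toList j t.toList.length
    simp only [PySem.Str.slice, hc, String.toList_ofList]
    exact List.prefix_iff_eq_take.mp hpre

-- every member of pvSubs (built from nonnegative lengths) is a substring of the text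
theorem pv_subs_isIn (text : String) (lengths : List Int)
    (hpos : ∀ L ∈ lengths, 0 ≤ L) (y : String) (hy : y ∈ pvSubs text lengths) :
    PySem.Str.isIn y text = true := by
  rw [pv_mem_pvSubs] at hy
  obtain ⟨L, hL, i, hi, rfl⟩ := hy
  rw [PySem.List.mem_pyRange_one] at hi
  exact pv_isIn_slice text i L hi.1 (hpos L hL)

-- the A-side loop with matching (result, seen) state is a foldl of Set.add over the kept tags
theorem pv_loopA (text : String) (allowed : Option (List String))
    (l : List (String × String)) (res : List String) :
    (l.foldl (pvStepA text allowed) (res, res)).1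
      = ((l.filter (fun p =>
            pvAllowedOk allowed p.1 && !(p.1 == "") && PySem.Str.isIn p.1 text && !(p.2 == ""))).map
          (fun p => p.2)).foldl PySem.Set.add res := by
  induction l generalizing res with
  | nil => simp
  | cons p l ih =>
    simp only [List.foldl_cons, List.filter_cons]
    by_cases ha : pvAllowedOk allowed p.1 = false
    · have hq : (pvAllowedOk allowed p.1 && !(p.1 == "") && PySem.Str.isIn p.1 text && !(p.2 == "")) = false := by
        simp [ha]
      rw [hq, pvStepA, if_pos ha]
      simp only [Bool.false_eq_true, if_false]
      exact ih res
    · have ha' : pvAllowedOk allowed p.1 = true := by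
        cases h : pvAllowedOk allowed p.1 <;> simp_all
      by_cases hb : p.1 ≠ "" ∧ PySem.Str.isIn p.1 text = true
      · have hbin : PySem.Chars.isIn p.1.toList text.toList = true := by
          rw [← PySem.Str.isIn_eq]; exact hb.2
        have hq : (pvAllowedOk allowed p.1 && !(p.1 == "") && PySem.Str.isIn p.1 text && !(p.2 == ""))
            = !(p.2 == "") := by
          simp [ha', hb.1, hbin]
        by_cases hc : p.2 ≠ "" ∧ PySem.Set.contains res p.2 = false
        · have hnm : p.2 ∉ res := by
            have := hc.2; simpa using this
          have hst : pvStepA text allowed (res, res) p = (res ++ [p.2], res ++ [p.2]) := by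
            rw [pvStepA, if_neg ha, if_pos hb, addUnique, if_pos hc]
            simp [PySem.Set.add, hnm]
          rw [hst, hq, ih (res ++ [p.2])]
          have h2 : (!(p.2 == "")) = true := by simp [hc.1]
          rw [h2, if_pos rfl]
          simp only [List.map_cons, List.foldl_cons]
          congr 1
          simp [PySem.Set.add, hnm]
        · have hst : pvStepA text allowed (res, res) p = (res, res) := by
            rw [pvStepA, if_neg ha, if_pos hb, addUnique, if_neg hc]
          rw [hst, hq, ih res]
          by_cases hd : p.2 = ""
          · simp [hd]
          · have hmem : p.2 ∈ res := by
              rcases not_and_or.mp hc with h | h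
              · exact absurd hd (by simpa using h)
              · have : PySem.Set.contains res p.2 = true := by
                  cases hh : PySem.Set.contains res p.2
                  · exact absurd hh h
                  · rfl
                exact (PySem.Set.contains_iff _ _).mp this
            have h2 : (!(p.2 == "")) = true := by simp [hd]
            rw [h2, if_pos rfl]
            simp only [List.map_cons, List.foldl_cons]
            congr 1
            simp [PySem.Set.add, hmem]
      · have hq : (pvAllowedOk allowed p.1 && !(p.1 == "") && PySem.Str.isIn p.1 text && !(p.2 == "")) = false := by
          rcases not_and_or.mp hb with h | h
          · have : p.1 = "" := by simpa using h
            simp [this]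
          · have hfin : PySem.Chars.isIn p.1.toList text.toList = false := by
              rw [← PySem.Str.isIn_eq]
              cases hh : PySem.Str.isIn p.1 text
              · rfl
              · exact absurd hh h
            simp [hfin]
        have hst : pvStepA text allowed (res, res) p = (res, res) := by
          rw [pvStepA, if_neg ha, if_neg hb]
        rw [hst, hq]
        simp only [Bool.false_eq_true, if_false]
        exact ih res

-- ===== VERDICT (by name: the statement is the Claim_ definition above) =====
theorem map_from_text_spec : Claim_equal_map_from_text := by
  unfold Claim_equal_map_from_text Spec_map_from_text
  intro text mapping allowed _
  unfold map_from_text map_from_text_alt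
  by_cases hT : text = ""
  · simp [hT]
  · simp only [hT, if_false]
    rw [show (([], PySem.Set.empty) : List String × PySem.Set String)
          = (([] : List String), ([] : List String)) from rfl]
    rw [pv_loopA text allowed mapping []]
    rw [← PySem.Set.ofList_eq_foldl, ← PySem.List.dedup_eq_ofList]
    congr 1
    apply congrArg
    apply List.filter_congr
    intro p hp
    by_cases ha : pvAllowedOk allowed p.1 = true
    · by_cases hne : p.1 = ""
      · simp [hne]
      · have hmemL : ((p.1.toList.length : Int)) ∈ pvLengths mapping allowed := by
          rw [pvLengths, PySem.Set.mem_ofList, List.mem_map]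
          refine ⟨p, ?_, ?_⟩
          · rw [List.mem_filter]
            exact ⟨hp, by simp [hne, ha]⟩
          · simp [PySem.Str.len_eq]
        have hpos : ∀ L ∈ pvLengths mapping allowed, 0 ≤ L := by
          intro L hL
          rw [pvLengths, PySem.Set.mem_ofList, List.mem_map] at hL
          obtain ⟨q, _, rfl⟩ := hL
          rw [PySem.Str.len_eq]
          positivity
        have hiff : PySem.Str.isIn p.1 text
            = PySem.Set.contains (pvSubs text (pvLengths mapping allowed)) p.1 := by
          cases h : PySem.Str.isIn p.1 text
          · cases hc : PySem.Set.contains (pvSubs text (pvLengths mapping allowed)) p.1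
            · rfl
            · exfalso
              have := pv_subs_isIn text (pvLengths mapping allowed) hpos p.1
                ((PySem.Set.contains_iff _ _).mp hc)
              rw [h] at this; exact Bool.false_ne_true this
          · symm
            rw [PySem.Set.contains_iff]
            exact pv_token_mem_subs text p.1 (pvLengths mapping allowed) hne h hmemL
        rw [hiff]
    · have ha' : pvAllowedOk allowed p.1 = false := by
        cases h : pvAllowedOk allowed p.1 <;> simp_all
      simp [ha']
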